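-- pv_equiv track=rewrite | github.com/Vcaudill/Sim | loci.py | count
-- ===== SOURCE A (Python) =====
-- def count(newgeneration):
--     countA = 0
--     countB = 0
--     countC = 0
--     countD = 0
--     for i in newgeneration:
--         if newgeneration[i] == [0, 0]:
--             countA = countA + 1
--         if newgeneration[i] == [0, 1]:
--             countB = countB + 1
--         if newgeneration[i] == [1, 0]:
--             countC = countC + 1
--         if newgeneration[i] == [1, 1]:
--             countD = countD + 1
--     return countA, countB, countC, countD
-- ===== SOURCE B (Python) =====
-- def count(newgeneration):
--     vals = list(newgeneration.values())
--     return (vals.count([0, 0]), vals.count([0, 1]),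
--             vals.count([1, 0]), vals.count([1, 1]))
-- ===== Notes on version B (the rewrite author's own statement) =====
-- stated objective: idiomatic
-- what changed: Replaces the single pass with four-way branching and a dict lookup per key by materialising the values list once and doing four independent list.count scans, eliminating the per-key hashing/lookup.
import Mathlib
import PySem

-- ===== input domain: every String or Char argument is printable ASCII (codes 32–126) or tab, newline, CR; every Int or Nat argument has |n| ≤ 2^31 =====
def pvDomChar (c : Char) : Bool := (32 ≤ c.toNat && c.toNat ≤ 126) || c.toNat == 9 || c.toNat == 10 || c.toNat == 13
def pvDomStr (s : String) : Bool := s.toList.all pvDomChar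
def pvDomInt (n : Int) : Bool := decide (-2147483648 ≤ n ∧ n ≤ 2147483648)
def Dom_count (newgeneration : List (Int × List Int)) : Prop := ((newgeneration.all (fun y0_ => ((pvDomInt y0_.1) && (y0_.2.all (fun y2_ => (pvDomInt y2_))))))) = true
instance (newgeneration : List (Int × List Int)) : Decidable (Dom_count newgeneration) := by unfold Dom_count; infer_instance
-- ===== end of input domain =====

-- B replaces A's single pass with per-key dict lookups by one values list and four independent count scans (idiomatic; same cost).


-- ===== PORT A =====
-- for i in newgeneration: look up newgeneration[i] (dict lookup) and bump the matching counter
def count (newgeneration : List (Int × List Int)) : Int × Int × Int × Int :=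
  newgeneration.foldl
    (fun acc kv =>
      let v := (PySem.Dict.mk newgeneration).getD kv.1 []
      ((if v = [0, 0] then acc.1 + 1 else acc.1),
       (if v = [0, 1] then acc.2.1 + 1 else acc.2.1),
       (if v = [1, 0] then acc.2.2.1 + 1 else acc.2.2.1),
       (if v = [1, 1] then acc.2.2.2 + 1 else acc.2.2.2)))
    (0, 0, 0, 0)

-- ===== PORT B =====
def count_alt (newgeneration : List (Int × List Int)) : Int × Int × Int × Int :=
  let vals := newgeneration.map (·.2)
  ((vals.count [0, 0] : Int), (vals.count [0, 1] : Int),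
   (vals.count [1, 0] : Int), (vals.count [1, 1] : Int))

-- ===== PRECONDITION & SPEC =====
-- Pre_ excludes association lists with duplicate keys: those do not represent any Python dict
-- (A's argument is a dict, whose keys are unique), so A's behaviour there is undefined.
def Pre_count (newgeneration : List (Int × List Int)) : Prop :=
  (newgeneration.map (·.1)).Nodup
instance (newgeneration : List (Int × List Int)) : Decidable (Pre_count newgeneration) := by unfold Pre_count; infer_instance
def pvWitness_count : (List (Int × List Int)) := [(1, [0, 0]), (2, [1, 1]), (3, [5])]

def Spec_count (newgeneration : List (Int × List Int)) (out : Int × Int × Int × Int) : Prop := out = count_alt newgeneration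
instance (newgeneration : List (Int × List Int)) (out : Int × Int × Int × Int) : Decidable (Spec_count newgeneration out) := by unfold Spec_count; infer_instance

-- ===== CLAIM (what is proved, stated in full; the proofs are below) =====
def Claim_equal_count : Prop := ∀ (newgeneration : List (Int × List Int)), Dom_count newgeneration → Pre_count newgeneration → Spec_count newgeneration (count newgeneration)

-- ===== LEMMAS AND PROOFS =====

-- A's loop, with every lookup already resolved to the entry's own value, accumulates the four counts.
theorem count_foldl_eq (d : PySem.Dict Int (List Int)) (l : List (Int × List Int))
    (h : ∀ kv ∈ l, d.getD kv.1 [] = kv.2) (a b c e : Int) :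
    l.foldl
      (fun acc kv =>
        let v := d.getD kv.1 []
        ((if v = [0, 0] then acc.1 + 1 else acc.1),
         (if v = [0, 1] then acc.2.1 + 1 else acc.2.1),
         (if v = [1, 0] then acc.2.2.1 + 1 else acc.2.2.1),
         (if v = [1, 1] then acc.2.2.2 + 1 else acc.2.2.2))) (a, b, c, e) =
      (a + ((l.map (·.2)).count [0, 0] : Int), b + ((l.map (·.2)).count [0, 1] : Int),
       c + ((l.map (·.2)).count [1, 0] : Int), e + ((l.map (·.2)).count [1, 1] : Int)) := by
  induction l generalizing a b c e with
  | nil => simp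
  | cons kv rest ih =>
    have hkv : d.getD kv.1 [] = kv.2 := h kv (by simp)
    have hrest : ∀ p ∈ rest, d.getD p.1 [] = p.2 := fun p hp => h p (by simp [hp])
    simp only [List.foldl_cons]
    rw [ih hrest]
    simp only [hkv, List.map_cons, List.count_cons, beq_iff_eq,
      @eq_comm (List Int) kv.2]
    refine Prod.ext ?_ (Prod.ext ?_ (Prod.ext ?_ ?_)) <;> simp only [] <;>
      split_ifs <;> push_cast <;> omega

theorem count_spec' (ng : List (Int × List Int)) (hnd : Pre_count ng) :
    count ng = count_alt ng := by
  have hk : ((PySem.Dict.mk ng).keys).Nodup := hnd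
  have h : ∀ kv ∈ ng, (PySem.Dict.mk ng).getD kv.1 [] = kv.2 := by
    intro kv hkv
    exact PySem.Dict.getD_of_mem_items (d := PySem.Dict.mk ng) (k := kv.1) (v := kv.2) hkv hk []
  unfold count count_alt
  rw [count_foldl_eq (PySem.Dict.mk ng) ng h 0 0 0 0]
  simp

-- ===== VERDICT (by name: the statement is the Claim_ definition above) =====
theorem count_spec : Claim_equal_count := by
  intro ng _ hpre
  exact count_spec' ng hpre
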